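-- pv_equiv track=rewrite | github.com/phatakshaunak/scaler_academy | DSA_Problem_Solving/Tries/contact_finder.py | solve
-- ===== SOURCE A (Python) =====
-- def solve(A, B):
--
--     n = len(A)
--     dummy = TrieNode('dummy')
--     ans = []
--
--     for i in range(n):
--
--         if A[i] == 0:
--             root = dummy
--             # Insert into the trie
--             for c in B[i]:
--                 if c not in root.children:
--                     root.children[c] = TrieNode(c)
--                 root = root.children[c]
--                 root.prefixCount += 1
--             root.isEnd = True
--
--         else:
--             # We need to search a prefix in the trie
--             root = dummy
--             early_flag = False
--             for c in B[i]:
--                 if c not in root.children: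
--                     early_flag = True
--                     break
--                 root = root.children[c]
--
--             if not early_flag:
--                 ans.append(root.prefixCount)
--             else:
--                 ans.append(0)
--
--     return ans
--
-- class TrieNode:
--     def __init__(self, char):
--         self.char = char
--         self.isEnd = False
--         self.children = {}
--         self.prefixCount = 0
-- ===== SOURCE B (Python) =====
-- def solve(A, B):
--     counts = {}
--     ans = []
--     for op, s in zip(A, B):
--         if op == 0:
--             p = ""
--             for c in s:
--                 p += c
--                 counts[p] = counts.get(p, 0) + 1
--         else:
--             ans.append(counts.get(s, 0))
--     return ans
-- ===== Notes on version B (the rewrite author's own statement) =====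
-- stated objective: simpler
-- what changed: Replaced the mutable trie of nodes with a single dict mapping each non-empty prefix string to its count: inserting bumps every prefix's entry, a query is one hash lookup with no walk/early-break flag.
import Mathlib
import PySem

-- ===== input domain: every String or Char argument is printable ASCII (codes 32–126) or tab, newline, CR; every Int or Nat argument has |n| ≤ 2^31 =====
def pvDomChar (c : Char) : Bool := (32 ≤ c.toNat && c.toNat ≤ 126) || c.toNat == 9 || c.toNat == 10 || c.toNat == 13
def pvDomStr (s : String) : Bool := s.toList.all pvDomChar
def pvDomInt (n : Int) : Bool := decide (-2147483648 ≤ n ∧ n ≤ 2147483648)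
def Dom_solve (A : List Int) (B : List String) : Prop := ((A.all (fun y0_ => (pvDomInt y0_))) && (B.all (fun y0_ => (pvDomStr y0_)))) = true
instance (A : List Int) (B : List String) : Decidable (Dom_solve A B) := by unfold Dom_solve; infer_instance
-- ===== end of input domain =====

-- B replaces A's mutable trie of nodes with one dict from non-empty prefix strings to counts
-- (insert bumps each prefix's entry; a query is a single lookup) — objective: simpler.

-- ===== PORT A =====
-- Python TrieNode objects form a tree mutated only along one root path per operation, so the
-- tree is ported as a value (mutual inductive: node + explicit child list in dict insertion order).
mutual
inductive ATrie : Type where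
  | node (isEnd : Bool) (prefixCount : Int) (children : AChildren) : ATrie
inductive AChildren : Type where
  | nil : AChildren
  | cons (c : Char) (t : ATrie) (rest : AChildren) : AChildren
end

-- 'c in root.children' / 'root.children[c]' on the child dict
def findChild : AChildren → Char → Option ATrie
  | .nil, _ => none
  | .cons d t rest, c => if d = c then some t else findChild rest c

-- 'root.children[c] = node' (overwrite in place, append if new — dict insertion order)
def setChild : AChildren → Char → ATrie → AChildren
  | .nil, c, u => .cons c u .nil
  | .cons d t rest, c, u => if d = c then .cons d u rest else .cons d t (setChild rest c u)

-- A's insert loop: 'for c in B[i]: …; root.prefixCount += 1' then 'root.isEnd = True'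
def insertA : ATrie → List Char → ATrie
  | .node _ pc ch, [] => .node true pc ch
  | .node e pc ch, c :: cs =>
      let child0 := (findChild ch c).getD (.node false 0 .nil)
      let child1 := match child0 with | .node e' pc' ch' => ATrie.node e' (pc' + 1) ch'
      .node e pc (setChild ch c (insertA child1 cs))

-- A's query loop with the early-break flag: none = early_flag True
def queryA : ATrie → List Char → Option ATrie
  | t, [] => some t
  | .node _ _ ch, c :: cs =>
      match findChild ch c with
      | some t => queryA t cs
      | none => none

def pcOf : ATrie → Int
  | .node _ pc _ => pc

def solveStepA (A : List Int) (B : List String) (st : ATrie × List Int) (i : Int) : ATrie × List Int :=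
  if PySem.List.pyGetD A i 0 == 0 then
    (insertA st.1 (PySem.List.pyGetD B i "").toList, st.2)
  else
    match queryA st.1 (PySem.List.pyGetD B i "").toList with
    | some r => (st.1, st.2 ++ [pcOf r])
    | none => (st.1, st.2 ++ [0])

def solve (A : List Int) (B : List String) : List Int :=
  ((PySem.List.pyRange 0 (A.length : Int) 1).foldl (solveStepA A B)
    (ATrie.node false 0 .nil, [])).2

-- ===== PORT B =====
-- B's inner loop 'for c in s: p += c; counts[p] = counts.get(p,0)+1' (state = (counts, p))
def insertB (counts : PySem.Dict (List Char) Int) (pref : List Char) :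
    List Char → PySem.Dict (List Char) Int
  | [] => counts
  | c :: cs =>
      insertB (counts.insert (pref ++ [c]) (counts.getD (pref ++ [c]) 0 + 1)) (pref ++ [c]) cs

def solveStepB (st : PySem.Dict (List Char) Int × List Int) (p : Int × String) :
    PySem.Dict (List Char) Int × List Int :=
  if p.1 == 0 then (insertB st.1 [] p.2.toList, st.2)
  else (st.1, st.2 ++ [st.1.getD p.2.toList 0])

def solve_alt (A : List Int) (B : List String) : List Int :=
  ((A.zip B).foldl solveStepB (PySem.Dict.empty, [])).2

-- ===== PRECONDITION & SPEC =====
-- Python A indexes B[i] for i in range(len(A)) and raises IndexError when B is shorter than A.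
def Pre_solve (A : List Int) (B : List String) : Prop := A.length ≤ B.length
instance (A : List Int) (B : List String) : Decidable (Pre_solve A B) := by
  unfold Pre_solve; infer_instance
def pvWitness_solve : List Int × List String := ([0, 0, 1, 1], ["ab", "a", "a", "b"])

def Spec_solve (A : List Int) (B : List String) (out : List Int) : Prop := out = solve_alt A B
instance (A : List Int) (B : List String) (out : List Int) : Decidable (Spec_solve A B out) := by
  unfold Spec_solve; infer_instance

-- ===== CLAIM (what is proved, stated in full; the proofs are below) =====
def Claim_equal_solve : Prop :=
  ∀ (A : List Int) (B : List String), Dom_solve A B → Pre_solve A B → Spec_solve A B (solve A B)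

-- ===== LEMMAS AND PROOFS =====

-- prefixCount of the node reached by path p (0 where A's walk breaks early)
def countAt (t : ATrie) (p : List Char) : Int :=
  match queryA t p with
  | some u => pcOf u
  | none => 0

theorem findChild_setChild (ch : AChildren) (c : Char) (u : ATrie) (d : Char) :
    findChild (setChild ch c u) d = if d = c then some u else findChild ch d := by
  match ch with
  | .nil =>
    rcases eq_or_ne d c with h | h
    · subst h; simp [setChild, findChild]
    · simp [setChild, findChild, h, h.symm]
  | .cons d' t rest =>
    have ih := findChild_setChild rest c u d
    simp only [setChild]
    rcases eq_or_ne d' c with h1 | h1 <;> rcases eq_or_ne d c with h2 | h2 <;>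
      simp_all [findChild, eq_comm]

theorem countAt_cons (e : Bool) (pc : Int) (ch : AChildren) (d : Char) (ps : List Char) :
    countAt (.node e pc ch) (d :: ps) =
      (match findChild ch d with | some u => countAt u ps | none => 0) := by
  simp only [countAt, queryA]
  cases findChild ch d <;> simp

theorem countAt_fresh (p : List Char) : countAt (.node false 0 .nil) p = 0 := by
  cases p <;> simp [countAt, queryA, pcOf, findChild]

-- effect of one A-insert on every path's count
theorem countAt_insertA (cs : List Char) (t : ATrie) (p : List Char) :
    countAt (insertA t cs) p = countAt t p + (if p ≠ [] ∧ p <+: cs then 1 else 0) := by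
  induction cs generalizing t p with
  | nil =>
    cases t with
    | node e pc ch =>
      cases p with
      | nil => simp [insertA, countAt, queryA, pcOf]
      | cons d ps =>
        simp only [insertA, countAt_cons]
        simp
  | cons c cs ih =>
    cases t with
    | node e pc ch =>
      cases p with
      | nil => simp [insertA, countAt, queryA, pcOf]
      | cons d ps =>
        simp only [insertA, countAt_cons, findChild_setChild]
        by_cases hdc : d = c
        · subst hdc
          simp only [if_true]
          simp only [ih]
          have hbump : ∀ (u : ATrie),
              countAt (match u with | .node e' pc' ch' => ATrie.node e' (pc' + 1) ch') ps =
                countAt u ps + (if ps = [] then 1 else 0) := by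
            intro u; cases u with
            | node e' pc' ch' =>
              cases ps with
              | nil => simp [countAt, queryA, pcOf]
              | cons q qs => simp [countAt_cons]
          rw [hbump]
          have hbase : countAt ((findChild ch d).getD (.node false 0 .nil)) ps =
              (match findChild ch d with | some u => countAt u ps | none => 0) := by
            cases findChild ch d with
            | some u => simp
            | none => simp [countAt_fresh]
          rw [hbase]
          simp only [List.cons_prefix_cons]
          by_cases hps : ps = [] <;> by_cases hpre : ps <+: cs <;> simp_all
        · simp only [if_neg hdc]
          have : ¬ (d :: ps ≠ [] ∧ d :: ps <+: c :: cs) := by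
            rintro ⟨-, hp⟩
            simp only [List.cons_prefix_cons] at hp
            exact hdc hp.1
          rw [if_neg this]
          simp

-- effect of one B-insert on every key's count
theorem getD_insertB (cs : List Char) (counts : PySem.Dict (List Char) Int) (pref p : List Char) :
    (insertB counts pref cs).getD p 0 =
      counts.getD p 0 +
        (if pref ≠ p ∧ pref <+: p ∧ p.drop pref.length <+: cs then 1 else 0) := by
  induction cs generalizing counts pref with
  | nil =>
    have : ¬ (pref ≠ p ∧ pref <+: p ∧ p.drop pref.length <+: ([] : List Char)) := by
      rintro ⟨hne, hpre, hdrop⟩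
      rw [List.prefix_nil, List.drop_eq_nil_iff] at hdrop
      exact hne (hpre.eq_of_length (le_antisymm hpre.length_le hdrop))
    simp only [insertB]
    rw [if_neg this]
    ring
  | cons c cs ih =>
    simp only [insertB]
    rw [ih]
    rw [PySem.Dict.getD_insert]
    rcases eq_or_ne p (pref ++ [c]) with hp | hp
    · subst hp
      rw [if_pos rfl]
      have h1 : ¬ (pref ++ [c] ≠ pref ++ [c] ∧ pref ++ [c] <+: pref ++ [c] ∧
          (pref ++ [c]).drop (pref ++ [c]).length <+: cs) := fun h => h.1 rfl
      rw [if_neg h1]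
      have h2 : pref ≠ pref ++ [c] ∧ pref <+: pref ++ [c] ∧
          (pref ++ [c]).drop pref.length <+: c :: cs := by
        refine ⟨by simp, List.prefix_append _ _, ?_⟩
        rw [List.drop_left]
        exact List.cons_prefix_cons.mpr ⟨rfl, List.nil_prefix⟩
      rw [if_pos h2]
      ring
    · rw [if_neg hp]
      have hiff : (pref ++ [c] ≠ p ∧ pref ++ [c] <+: p ∧ p.drop (pref ++ [c]).length <+: cs)
          ↔ (pref ≠ p ∧ pref <+: p ∧ p.drop pref.length <+: c :: cs) := by
      -- the new keys of the inner-loop suffix, seen from one step earlier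
        constructor
        · rintro ⟨-, hpre, hdrop⟩
          obtain ⟨r, hr⟩ := hpre
          have hplen : p.length = pref.length + 1 + r.length := by
            rw [← hr]; simp; omega
          refine ⟨?_, ?_, ?_⟩
          · intro h; rw [← h] at hplen; omega
          · exact ⟨c :: r, by rw [← hr]; simp⟩
          · have : p.drop pref.length = c :: r := by
              have : p = pref ++ (c :: r) := by rw [← hr]; simp
              rw [this, List.drop_left]
            rw [this]
            refine List.cons_prefix_cons.mpr ⟨rfl, ?_⟩
            have : p.drop (pref ++ [c]).length = r := by
              rw [← hr, List.drop_left]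
            rwa [this] at hdrop
        · rintro ⟨hne, hpre, hdrop⟩
          obtain ⟨q, hq⟩ := hpre
          have hqne : q ≠ [] := by rintro rfl; simp at hq; exact hne hq
          have hdq : p.drop pref.length = q := by rw [← hq, List.drop_left]
          rw [hdq] at hdrop
          obtain ⟨d, qs, rfl⟩ : ∃ d qs, q = d :: qs := by
            cases q with
            | nil => exact absurd rfl hqne
            | cons d qs => exact ⟨d, qs, rfl⟩
          obtain ⟨hd, hqs⟩ := List.cons_prefix_cons.mp hdrop
          have hp' : p = (pref ++ [c]) ++ qs := by rw [← hq, hd]; simp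
          refine ⟨fun h => hp h.symm, ⟨qs, hp'.symm⟩, ?_⟩
          rw [hp', List.drop_left]
          exact hqs
      rw [if_congr hiff rfl rfl]

-- the loop invariant: trie counts and dict counts agree on every path
def TrieInv (t : ATrie) (counts : PySem.Dict (List Char) Int) : Prop :=
  ∀ p : List Char, countAt t p = counts.getD p 0

theorem TrieInv_insert (t : ATrie) (counts : PySem.Dict (List Char) Int) (h : TrieInv t counts)
    (s : List Char) : TrieInv (insertA t s) (insertB counts [] s) := by
  intro p
  rw [countAt_insertA, getD_insertB, h p]
  have hiff : (p ≠ [] ∧ p <+: s) ↔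
      (([] : List Char) ≠ p ∧ [] <+: p ∧ p.drop ([] : List Char).length <+: s) := by
    simp [eq_comm]
  rw [if_congr hiff rfl rfl]

theorem main_loop (A : List Int) (B : List String) (hlen : A.length ≤ B.length)
    (k : Nat) (hk : k ≤ A.length) :
    TrieInv ((PySem.List.pyRange 0 (k : Int) 1).foldl (solveStepA A B) (ATrie.node false 0 .nil, [])).1
        (((A.zip B).take k).foldl solveStepB (PySem.Dict.empty, [])).1 ∧
    ((PySem.List.pyRange 0 (k : Int) 1).foldl (solveStepA A B) (ATrie.node false 0 .nil, [])).2 =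
      (((A.zip B).take k).foldl solveStepB (PySem.Dict.empty, [])).2 := by
  induction k with
  | zero =>
    rw [Nat.cast_zero, show PySem.List.pyRange 0 0 1 = [] from by
      simpa using PySem.List.pyRange_zero_natCast 0]
    simp only [List.foldl_nil, List.take_zero]
    refine ⟨?_, by trivial⟩
    intro p
    rw [countAt_fresh, PySem.Dict.getD_empty]
  | succ k ih =>
    have hklt : k < A.length := hk
    obtain ⟨ht, hans⟩ := ih (Nat.le_of_lt hklt)
    have hrange : PySem.List.pyRange 0 ((k + 1 : Nat) : Int) 1 =
        PySem.List.pyRange 0 (k : Int) 1 ++ [(k : Int)] := by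
      rw [PySem.List.pyRange_zero_natCast, PySem.List.pyRange_zero_natCast,
        List.range_succ, List.map_append]
      rfl
    have htake : ((A.zip B).take (k + 1)) =
        ((A.zip B).take k) ++ [(A[k]'hklt, B[k]'(lt_of_lt_of_le hklt hlen))] := by
      rw [List.take_add_one]
      congr 1
      have hkz : k < (A.zip B).length := by simp [List.length_zip]; omega
      rw [List.getElem?_eq_getElem hkz]
      simp [List.getElem_zip]
    rw [hrange, htake, List.foldl_append, List.foldl_append]
    set stA := (PySem.List.pyRange 0 (k : Int) 1).foldl (solveStepA A B)
      (ATrie.node false 0 .nil, ([] : List Int)) with hstA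
    set stB := ((A.zip B).take k).foldl solveStepB (PySem.Dict.empty, ([] : List Int)) with hstB
    simp only [List.foldl_cons, List.foldl_nil]
    have hA : PySem.List.pyGetD A (k : Int) 0 = A[k]'hklt := by
      rw [PySem.List.pyGetD_natCast, List.getD_eq_getElem]
    have hB : PySem.List.pyGetD B (k : Int) "" = B[k]'(lt_of_lt_of_le hklt hlen) := by
      rw [PySem.List.pyGetD_natCast, List.getD_eq_getElem]
    unfold solveStepA solveStepB
    rw [hA, hB]
    by_cases h0 : A[k]'hklt = 0
    · simp only [h0, beq_self_eq_true, if_true]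
      exact ⟨TrieInv_insert _ _ ht _, hans⟩
    · simp only [beq_iff_eq, h0, if_false]
      cases hq : queryA stA.1 ((B[k]'(lt_of_lt_of_le hklt hlen)).toList) with
      | some r =>
        refine ⟨ht, ?_⟩
        have := ht ((B[k]'(lt_of_lt_of_le hklt hlen)).toList)
        rw [countAt, hq] at this
        dsimp only at this
        dsimp only
        rw [hans, this]
      | none =>
        refine ⟨ht, ?_⟩
        have := ht ((B[k]'(lt_of_lt_of_le hklt hlen)).toList)
        rw [countAt, hq] at this
        dsimp only at this
        dsimp only
        rw [hans, ← this]

-- ===== VERDICT (by name: the statement is the Claim_ definition above) =====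
theorem solve_spec : Claim_equal_solve := by
  intro A B _hdom hpre
  unfold Spec_solve solve solve_alt
  have h := (main_loop A B hpre A.length le_rfl).2
  have htake : (A.zip B).take A.length = A.zip B := by
    apply List.take_of_length_le
    simp
  rw [htake] at h
  exact h
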